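-- pv_equiv track=rewrite | github.com/seohyunaum/CS1301 | HW09.py | lengthDict
-- ===== SOURCE A (Python) =====
-- def lengthDict(names):
--     if len(names) == 0:
--         return {}
--     else:
--         count = 0
--         for char in names[0]:
--             if char.lower() in 'bcdfghjklmnpqrstvwxyz':
--                 count += 1
--         tempDict = lengthDict(names[1:])
--         tempDict[names[0]] = count
--         return tempDict
-- ===== SOURCE B (Python) =====
-- def lengthDict(names):
--     d = {}
--     for name in reversed(names):
--         d[name] = sum(1 for c in name if c.lower() in 'bcdfghjklmnpqrstvwxyz')
--     return d
-- ===== Notes on version B (the rewrite author's own statement) =====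
-- stated objective: faster
-- what changed: Replaces the list-tail recursion (which copies names[1:] at every level and builds the dict from the tail) with a single iterative loop over reversed(names) assigning each name's consonant count, the count computed as a sum over a generator instead of a counter loop.
import Mathlib
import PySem

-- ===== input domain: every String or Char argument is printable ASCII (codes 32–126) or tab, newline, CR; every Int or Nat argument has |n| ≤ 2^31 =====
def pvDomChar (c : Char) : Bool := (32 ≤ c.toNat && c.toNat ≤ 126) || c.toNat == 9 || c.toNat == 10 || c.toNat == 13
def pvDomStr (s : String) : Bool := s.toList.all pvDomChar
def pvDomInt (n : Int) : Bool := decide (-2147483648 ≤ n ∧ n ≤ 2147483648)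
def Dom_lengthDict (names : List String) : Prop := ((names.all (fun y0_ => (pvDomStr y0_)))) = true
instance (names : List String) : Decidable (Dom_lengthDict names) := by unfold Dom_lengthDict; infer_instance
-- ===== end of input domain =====

-- B replaces A's tail recursion by one iterative pass (over reversed(names), preserving A's insertion order) with the count as a filtered length; return value only, no speed claim.

-- Python dict assignment d[k] = v on an association list: overwrite in place, new keys append (shared dict primitive for both ports).
def pvSetKey (d : List (String × Int)) (k : String) (v : Int) : List (String × Int) :=
  match d with
  | [] => [(k, v)]
  | (k', v') :: rest => if k' = k then (k, v) :: rest else (k', v') :: pvSetKey rest k v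

-- ===== PORT A =====
def lengthDict (names : List String) : List (String × Int) :=
  match names with
  | [] => []
  | h :: t =>
    let count : Int := h.toList.foldl
      (fun c ch => if ("bcdfghjklmnpqrstvwxyz".toList.contains (PySem.Chars.lowerChar ch)) then c + 1 else c) 0
    pvSetKey (lengthDict t) h count

-- ===== PORT B =====
def lengthDict_alt (names : List String) : List (String × Int) :=
  names.reverse.foldl
    (fun d name =>
      pvSetKey d name
        ((name.toList.filter
            (fun c => "bcdfghjklmnpqrstvwxyz".toList.contains (PySem.Chars.lowerChar c))).length : Int))
    []

-- ===== PRECONDITION & SPEC =====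
def Spec_lengthDict (names : List String) (out : List (String × Int)) : Prop := out = lengthDict_alt names
instance (names : List String) (out : List (String × Int)) : Decidable (Spec_lengthDict names out) := by unfold Spec_lengthDict; infer_instance

-- ===== CLAIM (what is proved, stated in full; the proofs are below) =====
def Claim_equal_lengthDict : Prop := ∀ (names : List String), Dom_lengthDict names → Spec_lengthDict names (lengthDict names)

-- ===== LEMMAS AND PROOFS =====

theorem pvCount_eq (p : Char → Bool) (l : List Char) (c : Int) :
    l.foldl (fun c ch => if p ch then c + 1 else c) c = c + ((l.filter p).length : Int) := by
  induction l generalizing c with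
  | nil => simp
  | cons h t ih =>
    simp only [List.foldl, List.filter]
    by_cases hp : p h = true
    · simp [hp, ih]; ring
    · simp [hp, ih]

theorem lengthDict_eq_alt (names : List String) : lengthDict names = lengthDict_alt names := by
  induction names with
  | nil => rfl
  | cons h t ih =>
    simp only [lengthDict, lengthDict_alt, List.reverse_cons, List.foldl_append, List.foldl]
    rw [ih, pvCount_eq]
    simp [lengthDict_alt]

-- ===== VERDICT (by name: the statement is the Claim_ definition above) =====
theorem lengthDict_spec : Claim_equal_lengthDict := by
  intro names _
  unfold Spec_lengthDict
  exact lengthDict_eq_alt names
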